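-- pv_equiv track=rewrite | github.com/ericzhang98/competitive | codejam/2021/round1c/b.py | easy_solution
-- ===== SOURCE A (Python) =====
-- def is_roaring(num):
--     s = str(num)
--     for i in range(1,len(s)):
--         start = int(s[:i])
--         curr = str(start)
--         while int(curr) <= num:
--             if int(curr) == num:
--                 return True
--             curr = curr + str(start+1)
--             start += 1
--     return False
--
-- def extend(start, Y):
--     add = int(start) + 1
--     curr = str(start)
--     while int(curr) <= Y:
--         curr += str(add)
--         add += 1
--     return int(curr)
--
-- def easy_solution(Y):
--     if Y <= 10**6:
--         # dumb soln
--         for guess in range(Y+1, 100000000100000001):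
--             if is_roaring(guess):
--                 return guess
--
--     if Y < 12:
--         return 12
--
--     ans = 100000000100000001
--     s = str(Y)
--     for i in range(1,len(s)):
--         start = int(s[:i])
--         ans = min(extend(start, Y), ans)
--         ans = min(extend(start+1, Y), ans)
--     return ans
-- ===== SOURCE B (Python) =====
-- def _digits(n):
--     d = 1
--     while n >= 10 ** d:
--         d += 1
--     return d
--
--
-- def _chain_up(start, Y):
--     # smallest concatenation start|start+1|...|start+k-1 (k >= 2 terms) exceeding Y
--     v = start
--     nxt = start + 1
--     while True:
--         v = v * 10 ** _digits(nxt) + nxt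
--         if v > Y:
--             return v
--         nxt += 1
--
--
-- def easy_solution(Y):
--     if Y <= 10**6:
--         # the answer's first term s satisfies s|s+1 <= answer, so s <= Y + 1
--         return min(_chain_up(s, Y) for s in range(1, max(Y + 2, 2)))
--     ans = 100000000100000001
--     d = _digits(Y)
--     for i in range(1, d):
--         p = Y // 10 ** (d - i)
--         ans = min(_chain_up(p, Y), ans)
--         ans = min(_chain_up(p + 1, Y), ans)
--     return ans
-- ===== Notes on version B (the rewrite author's own statement) =====
-- stated objective: alternative
-- what changed: For Y <= 10^6 the upward scan with a string-based is_roaring test is replaced by taking the minimum over candidate first terms s of the smallest consecutive-concatenation exceeding Y, and all string building/parsing (str slicing, concatenation, int()) is replaced by pure arithmetic on digit counts; for Y > 10^6 the same prefix-candidate minimum is computed arithmetically.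
import Mathlib
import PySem

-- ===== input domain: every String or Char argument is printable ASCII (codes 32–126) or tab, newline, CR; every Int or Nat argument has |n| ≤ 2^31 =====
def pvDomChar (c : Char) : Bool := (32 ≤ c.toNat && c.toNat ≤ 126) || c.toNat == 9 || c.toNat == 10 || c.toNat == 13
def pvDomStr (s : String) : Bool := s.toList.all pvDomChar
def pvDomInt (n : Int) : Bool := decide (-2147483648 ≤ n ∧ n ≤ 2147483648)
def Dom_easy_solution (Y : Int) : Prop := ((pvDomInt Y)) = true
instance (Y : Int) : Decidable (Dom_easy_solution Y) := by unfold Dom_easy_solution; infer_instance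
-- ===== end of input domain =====

-- B restructures A (no string arithmetic; candidate-minimum instead of an upward scan for small Y); same return value for every Y ≥ -1.

-- ===== PORT A =====
-- while-loops are ported with fuel; the fuel is always sufficient on the admitted inputs (proved below).

-- inner while-loop of is_roaring: `while int(curr) <= num: if int(curr) == num: return True; curr += str(start+1); start += 1`
def isRoaringInner (num : Int) (start : Int) (curr : List Char) : Nat → Bool
  | 0 => false
  | f+1 =>
    let v := (PySem.Int.ofChars? curr).getD 0
    if v ≤ num then
      if v = num then true
      else isRoaringInner num (start + 1) (curr ++ PySem.Int.toChars (start + 1)) f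
    else false

def isRoaring (num : Int) : Bool :=
  let s := PySem.Int.toChars num
  (PySem.List.pyRange 1 (s.length : Int) 1).any (fun i =>
    let start := (PySem.Int.ofChars? (PySem.List.slice s none (some i))).getD 0
    isRoaringInner num start (PySem.Int.toChars start) (num.toNat + 2))

-- `for guess in range(Y+1, 100000000100000001): if is_roaring(guess): return guess`
def scanRoar (g : Int) : Nat → Option Int
  | 0 => none
  | f+1 => if isRoaring g then some g else scanRoar (g + 1) f

-- extend(start, Y): add = int(start)+1; curr = str(start); while int(curr) <= Y: curr += str(add); add += 1; return int(curr)
def extendA (Y : Int) (curr : List Char) (add : Int) : Nat → Int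
  | 0 => (PySem.Int.ofChars? curr).getD 0
  | f+1 =>
    let v := (PySem.Int.ofChars? curr).getD 0
    if v ≤ Y then extendA Y (curr ++ PySem.Int.toChars add) (add + 1) f
    else v

def easy_solution (Y : Int) : Int :=
  let scanned := if Y ≤ 10 ^ 6 then scanRoar (Y + 1) (100000000100000001 - (Y + 1)).toNat else none
  match scanned with
  | some g => g
  | none =>
    if Y < 12 then 12
    else
      let s := PySem.Int.toChars Y
      (PySem.List.pyRange 1 (s.length : Int) 1).foldl (fun ans i =>
        let start := (PySem.Int.ofChars? (PySem.List.slice s none (some i))).getD 0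
        let ans := min (extendA Y (PySem.Int.toChars start) (start + 1) (Y.toNat + 2)) ans
        min (extendA Y (PySem.Int.toChars (start + 1)) (start + 2) (Y.toNat + 2)) ans) 100000000100000001

-- ===== PORT B =====
-- _digits(n): d = 1; while n >= 10 ** d: d += 1; return d
def digitsBLoop (n : Int) : Nat → Int → Int
  | 0, d => d
  | f+1, d => if (10 : Int) ^ d.toNat ≤ n then digitsBLoop n f (d + 1) else d

def digitsB (n : Int) : Int := digitsBLoop n (n.toNat + 1) 1

-- _chain_up(start, Y): v = start; nxt = start+1; loop: v = v*10**_digits(nxt) + nxt; if v > Y: return v; nxt += 1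
def chainUpLoop (Y : Int) (v nxt : Int) : Nat → Int
  | 0 => v
  | f+1 =>
    let v' := v * (10 : Int) ^ (digitsB nxt).toNat + nxt
    if Y < v' then v' else chainUpLoop Y v' (nxt + 1) f

def chainUpB (start Y : Int) : Int := chainUpLoop Y start (start + 1) (Y.toNat + 2)

def easy_solution_alt (Y : Int) : Int :=
  if Y ≤ 10 ^ 6 then
    (PySem.List.min? ((PySem.List.pyRange 1 (max (Y + 2) 2) 1).map (fun s => chainUpB s Y))
      (fun x => x)).getD 0
  else
    let d := digitsB Y
    (PySem.List.pyRange 1 d 1).foldl (fun ans i =>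
      let p := PySem.Int.floordiv Y ((10 : Int) ^ (d - i).toNat)
      let ans := min (chainUpB p Y) ans
      min (chainUpB (p + 1) Y) ans) 100000000100000001

-- ===== PRECONDITION & SPEC =====
-- A raises ValueError exactly for Y ≤ -2 (int('-') on a prefix of str of a negative guess).
def Pre_easy_solution (Y : Int) : Prop := -1 ≤ Y
instance (Y : Int) : Decidable (Pre_easy_solution Y) := by unfold Pre_easy_solution; infer_instance
def pvWitness_easy_solution : Int := 5

def Spec_easy_solution (Y : Int) (out : Int) : Prop := out = easy_solution_alt Y
instance (Y : Int) (out : Int) : Decidable (Spec_easy_solution Y out) := by unfold Spec_easy_solution; infer_instance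

-- ===== CLAIM (what is proved, stated in full; the proofs are below) =====
def Claim_equal_easy_solution : Prop := ∀ (Y : Int), Dom_easy_solution Y → Pre_easy_solution Y → Spec_easy_solution Y (easy_solution Y)

-- ===== LEMMAS AND PROOFS =====

-- ---- a public clone of PySem.Int.ofChars? (whose digit-parsing helper is private), proved equal to it ----
def mygo : List Char → Bool → Nat → Option Nat
  | [], afterDigit, acc => if afterDigit = true then some acc else none
  | c :: rest, afterDigit, acc =>
    if c.isDigit = true then mygo rest true (acc * 10 + (c.toNat - '0'.toNat))
    else
      if c = '_' ∧ afterDigit = true then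
        match rest with
        | d :: _ => if d.isDigit = true then mygo rest false acc else none
        | [] => none
      else none

def myDigitsVal : List Char → Option Nat
  | [] => none
  | cs => mygo cs false 0

def myOfChars (s : List Char) : Option Int :=
  match (List.dropWhile PySem.Int.isIntSpace (List.dropWhile PySem.Int.isIntSpace s).reverse).reverse with
  | '-' :: ds => Option.map (fun n => -n) do
      let a ← myDigitsVal ds
      pure (↑a : Int)
  | '+' :: ds => Option.map (fun n => n) do
      let a ← myDigitsVal ds
      pure (↑a : Int)
  | ds => Option.map (fun n => n) do
      let a ← myDigitsVal ds
      pure (↑a : Int)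

theorem ofChars_eq_clone : PySem.Int.ofChars? = myOfChars := by
  funext s
  unfold PySem.Int.ofChars? myOfChars
  generalize (List.dropWhile PySem.Int.isIntSpace (List.dropWhile PySem.Int.isIntSpace s).reverse).reverse = cs
  refine congrFun (congrArg (fun (g : List Char → Option Nat) => fun (cs : List Char) =>
    match cs with
    | '-' :: ds => Option.map (fun n => -n) do
        let a ← g ds
        pure (↑a : Int)
    | '+' :: ds => Option.map (fun n => n) do
        let a ← g ds
        pure (↑a : Int)
    | ds => Option.map (fun n => n) do
        let a ← g ds
        pure (↑a : Int)) ?_) cs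
  refine congrArg (fun (g : List Char → Bool → Nat → Option Nat) => fun (x : List Char) => match x with | [] => (none : Option Nat) | cs => g cs false 0) ?_
  funext t ad acc
  induction t generalizing ad acc with
  | nil => rfl
  | cons c rest ih =>
    conv => lhs; whnf
    simp only [ih]
    rcases hc : c.isDigit with _ | _ <;> simp [mygo, hc] <;> rfl

-- ---- digit-string values ----
def valD (cs : List Char) : Nat := cs.foldl (fun a c => a * 10 + (c.toNat - 48)) 0

def AllDigit (cs : List Char) : Prop := ∀ c ∈ cs, c.isDigit = true

theorem valD_acc (cs : List Char) (a : Nat) :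
    cs.foldl (fun a c => a * 10 + (c.toNat - 48)) a = a * 10 ^ cs.length + valD cs := by
  induction cs generalizing a with
  | nil => simp [valD]
  | cons c t ih =>
    simp only [List.foldl_cons, List.length_cons, valD]
    rw [ih, ih (0 * 10 + (c.toNat - 48))]
    ring

theorem valD_append (u w : List Char) : valD (u ++ w) = valD u * 10 ^ w.length + valD w := by
  unfold valD
  rw [List.foldl_append, valD_acc]
  rfl

theorem mygo_digits (cs : List Char) (h : AllDigit cs) (acc : Nat) :
    mygo cs true acc = some (cs.foldl (fun a c => a * 10 + (c.toNat - 48)) acc) := by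
  induction cs generalizing acc with
  | nil => simp [mygo]
  | cons c t ih =>
    have hc : c.isDigit = true := h c (by simp)
    have ht : AllDigit t := fun x hx => h x (by simp [hx])
    simp [mygo, hc, ih ht]

theorem digit_not_space (c : Char) (hc : c.isDigit = true) : PySem.Int.isIntSpace c = false := by
  simp only [PySem.Int.isIntSpace, Bool.or_eq_false_iff, decide_eq_false_iff_not]
  refine ⟨⟨⟨⟨⟨?_, ?_⟩, ?_⟩, ?_⟩, ?_⟩, ?_⟩ <;> (rintro rfl; exact absurd hc (by decide))

theorem digit_ne_minus (c : Char) (hc : c.isDigit = true) : c ≠ '-' := by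
  rintro rfl; exact absurd hc (by decide)

theorem digit_ne_plus (c : Char) (hc : c.isDigit = true) : c ≠ '+' := by
  rintro rfl; exact absurd hc (by decide)

theorem dropWhile_eq_self_of_all {p : Char → Bool} {l : List Char}
    (h : ∀ x ∈ l, p x = false) : List.dropWhile p l = l := by
  cases l with
  | nil => rfl
  | cons c t => simp [h c (by simp)]

theorem parse_digits (cs : List Char) (hne : cs ≠ []) (h : AllDigit cs) :
    PySem.Int.ofChars? cs = some ((valD cs : Nat) : Int) := by
  obtain ⟨c, t, rfl⟩ : ∃ c t, cs = c :: t := by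
    cases cs with
    | nil => exact absurd rfl hne
    | cons c t => exact ⟨c, t, rfl⟩
  have hc : c.isDigit = true := h c (by simp)
  have hall : ∀ x ∈ c :: t, PySem.Int.isIntSpace x = false := fun x hx => digit_not_space x (h x hx)
  rw [ofChars_eq_clone]
  unfold myOfChars
  rw [dropWhile_eq_self_of_all hall]
  rw [dropWhile_eq_self_of_all (fun x hx => hall x (by simpa using List.mem_reverse.mp hx))]
  rw [List.reverse_reverse]
  split
  · next ds heq =>
    exact absurd (List.head_eq_of_cons_eq heq) (digit_ne_minus c hc)
  · next ds heq =>
    exact absurd (List.head_eq_of_cons_eq heq) (digit_ne_plus c hc)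
  · have ht : AllDigit t := fun x hx => h x (by simp [hx])
    simp only [myDigitsVal, mygo, hc, if_true]
    rw [mygo_digits t ht]
    simp [valD]


-- ---- Nat.toDigits 10 facts ----
def ndig (m : Nat) : Nat := (Nat.toDigits 10 m).length

theorem digitChar_isDigit (r : Nat) (h : r < 10) : (Nat.digitChar r).isDigit = true := by
  interval_cases r <;> decide

theorem digitChar_val (r : Nat) (h : r < 10) : (Nat.digitChar r).toNat - 48 = r := by
  interval_cases r <;> decide

theorem toDigits_all_digit (m : Nat) : AllDigit (Nat.toDigits 10 m) := by
  induction m using Nat.strong_induction_on with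
  | _ m ih =>
    rw [Nat.toDigits_eq_if (by norm_num)]
    split_ifs with h
    · intro c hc
      simp only [List.mem_singleton] at hc
      subst hc
      exact digitChar_isDigit m h
    · intro c hc
      rcases List.mem_append.mp hc with h1 | h1
      · exact ih (m / 10) (by omega) c h1
      · simp only [List.mem_singleton] at h1
        subst h1
        exact digitChar_isDigit _ (Nat.mod_lt _ (by norm_num))

theorem toDigits_ne_nil (m : Nat) : Nat.toDigits 10 m ≠ [] := by
  rw [Nat.toDigits_eq_if (by norm_num)]
  split_ifs <;> simp

theorem valD_toDigits (m : Nat) : valD (Nat.toDigits 10 m) = m := by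
  induction m using Nat.strong_induction_on with
  | _ m ih =>
    rw [Nat.toDigits_eq_if (by norm_num)]
    split_ifs with h
    · simp [valD, digitChar_val m h]
    · rw [valD_append, ih (m / 10) (by omega)]
      have : valD [(m % 10).digitChar] = (m % 10).digitChar.toNat - 48 := by simp [valD]
      rw [this, digitChar_val _ (Nat.mod_lt _ (by norm_num))]
      simp only [List.length_singleton, pow_one]
      omega

theorem ndig_pos (m : Nat) : 1 ≤ ndig m := by
  unfold ndig
  have := toDigits_ne_nil m
  cases h : Nat.toDigits 10 m with
  | nil => exact absurd h this
  | cons a t => simp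

theorem ndig_bounds (m : Nat) (h : 1 ≤ m) : 10 ^ (ndig m - 1) ≤ m ∧ m < 10 ^ ndig m := by
  induction m using Nat.strong_induction_on with
  | _ m ih =>
    by_cases hlt : m < 10
    · have h1 : ndig m = 1 := by
        unfold ndig
        rw [Nat.toDigits_of_lt_base hlt]
        rfl
      rw [h1]
      simpa using ⟨h, hlt⟩
    · have hstep : ndig m = ndig (m / 10) + 1 := by
        unfold ndig
        rw [Nat.toDigits_eq_if (by norm_num), if_neg hlt]
        simp
      have hd : 1 ≤ m / 10 := by omega
      obtain ⟨hA, hB⟩ := ih (m / 10) (by omega) hd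
      constructor
      · rw [hstep]
        have : 10 ^ (ndig (m / 10) + 1 - 1) = 10 ^ (ndig (m / 10) - 1) * 10 := by
          have := ndig_pos (m / 10)
          rw [← pow_succ]
          congr 1
          omega
        rw [this]
        have : 10 ^ (ndig (m / 10) - 1) * 10 ≤ (m / 10) * 10 := by
          exact Nat.mul_le_mul_right _ hA
        omega
      · rw [hstep, pow_succ]
        have : m < (m / 10) * 10 + 10 := by omega
        have h2 : (m / 10) * 10 + 10 ≤ 10 ^ ndig (m / 10) * 10 := by
          have := Nat.mul_le_mul_right 10 (Nat.succ_le_of_lt hB)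
          omega
        omega

theorem toChars_nonneg (n : Int) (h : 0 ≤ n) : PySem.Int.toChars n = Nat.toDigits 10 n.toNat := by
  unfold PySem.Int.toChars
  rw [if_neg (by omega)]


theorem toDigits_append (b a : Nat) (ha : 1 ≤ a) :
    Nat.toDigits 10 (a * 10 ^ ndig b + b) = Nat.toDigits 10 a ++ Nat.toDigits 10 b := by
  induction b using Nat.strong_induction_on with
  | _ b ih =>
    by_cases hlt : b < 10
    · have h1 : ndig b = 1 := by
        unfold ndig
        rw [Nat.toDigits_of_lt_base hlt]
        rfl
      rw [h1, pow_one]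
      rw [show a * 10 + b = 10 * a + b by ring]
      exact (Nat.toDigits_append_toDigits (by norm_num) (by omega) hlt).symm
    · have hb1 : Nat.toDigits 10 b = Nat.toDigits 10 (b / 10) ++ [(b % 10).digitChar] := by
        rw [Nat.toDigits_eq_if (b := 10) (by norm_num), if_neg hlt]
      have hstep : ndig b = ndig (b / 10) + 1 := by
        unfold ndig
        rw [Nat.toDigits_eq_if (by norm_num), if_neg hlt]
        simp
      have key : a * 10 ^ ndig b + b = (a * 10 ^ ndig (b / 10) + b / 10) * 10 + b % 10 := by
        rw [hstep, pow_succ]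
        have := Nat.div_add_mod b 10
        ring_nf
        omega
      rw [key]
      rw [show (a * 10 ^ ndig (b / 10) + b / 10) * 10 + b % 10
            = 10 * (a * 10 ^ ndig (b / 10) + b / 10) + b % 10 from by ring]
      rw [← Nat.toDigits_append_toDigits (by norm_num : (1:Nat) < 10)
            (show 0 < a * 10 ^ ndig (b / 10) + b / 10 by positivity)
            (Nat.mod_lt _ (by norm_num : (0:Nat) < 10))]
      rw [ih (b / 10) (by omega), hb1, Nat.toDigits_of_lt_base (Nat.mod_lt _ (by norm_num))]
      simp

theorem valD_take (m : Nat) (hm : 1 ≤ m) (i : Nat) (h1 : 1 ≤ i) (h2 : i ≤ ndig m) :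
    valD ((Nat.toDigits 10 m).take i) = m / 10 ^ (ndig m - i) := by
  induction m using Nat.strong_induction_on with
  | _ m ih =>
    by_cases hlt : m < 10
    · have hnd : ndig m = 1 := by
        unfold ndig
        rw [Nat.toDigits_of_lt_base hlt]
        rfl
      have hi : i = 1 := by omega
      subst hi
      rw [hnd, Nat.toDigits_of_lt_base hlt]
      simp [valD, digitChar_val m hlt]
    · have hb1 : Nat.toDigits 10 m = Nat.toDigits 10 (m / 10) ++ [(m % 10).digitChar] := by
        rw [Nat.toDigits_eq_if (b := 10) (by norm_num), if_neg hlt]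
      have hstep : ndig m = ndig (m / 10) + 1 := by
        unfold ndig
        rw [Nat.toDigits_eq_if (by norm_num), if_neg hlt]
        simp
      have hlen : (Nat.toDigits 10 (m / 10)).length = ndig (m / 10) := rfl
      by_cases hi : i ≤ ndig (m / 10)
      · rw [hb1, List.take_append_of_le_length (by rw [hlen]; exact hi)]
        rw [ih (m / 10) (by omega) (by omega) hi]
        rw [hstep]
        rw [show ndig (m / 10) + 1 - i = (ndig (m / 10) - i) + 1 from by omega]
        rw [pow_succ]
        rw [Nat.div_div_eq_div_mul]
        congr 1
        ring
      · have hi2 : i = ndig m := by omega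
        subst hi2
        rw [show ndig m - ndig m = 0 from by omega, pow_zero, Nat.div_one]
        have : (Nat.toDigits 10 m).length = ndig m := rfl
        rw [List.take_of_length_le (by rw [this])]
        exact valD_toDigits m

-- ---- chains of consecutive numbers (the mathematical object both programs compute with) ----
def chain (s : Nat) : Nat → Nat
  | 0 => s
  | j+1 => chain s j * 10 ^ ndig (s + j + 1) + (s + j + 1)

def IsRoar (n : Nat) : Prop := ∃ s, 1 ≤ s ∧ ∃ j, 1 ≤ j ∧ chain s j = n

theorem ten_le_pow_ndig (m : Nat) : 10 ≤ 10 ^ ndig m := by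
  calc (10:Nat) = 10 ^ 1 := (pow_one 10).symm
  _ ≤ 10 ^ ndig m := Nat.pow_le_pow_right (by norm_num) (ndig_pos m)

theorem ndig_mono (a b : Nat) (ha : 1 ≤ a) (hab : a ≤ b) : ndig a ≤ ndig b := by
  by_contra hcon
  rw [not_le] at hcon
  have h1 := (ndig_bounds a ha).1
  have h2 := (ndig_bounds b (by omega)).2
  have h3 : 10 ^ ndig b ≤ 10 ^ (ndig a - 1) := Nat.pow_le_pow_right (by norm_num) (by omega)
  have hba : b < a := lt_of_lt_of_le (lt_of_lt_of_le h2 h3) h1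
  omega

theorem chain_pos (s : Nat) (hs : 1 ≤ s) (j : Nat) : 1 ≤ chain s j := by
  induction j with
  | zero => exact hs
  | succ j ih =>
    have := ten_le_pow_ndig (s + j + 1)
    simp only [chain]
    nlinarith

theorem chain_step_lt (s : Nat) (hs : 1 ≤ s) (j : Nat) : chain s j < chain s (j+1) := by
  have h1 := chain_pos s hs j
  have h2 := ten_le_pow_ndig (s + j + 1)
  simp only [chain]
  nlinarith

theorem chain_mono (s : Nat) (hs : 1 ≤ s) {j j' : Nat} (h : j < j') : chain s j < chain s j' := by
  obtain ⟨d, rfl⟩ : ∃ d, j' = j + (d + 1) := ⟨j' - j - 1, by omega⟩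
  clear h
  induction d with
  | zero => exact chain_step_lt s hs j
  | succ d ih =>
    have h2 := chain_step_lt s hs (j + (d + 1))
    have e : j + (d + 1) + 1 = j + (d + 1 + 1) := by omega
    rw [e] at h2
    omega


theorem chain1_mono (s : Nat) (hs : 1 ≤ s) : chain s 1 < chain (s+1) 1 := by
  have hm : ndig (s + 1) ≤ ndig (s + 2) := ndig_mono _ _ (by omega) (by omega)
  have hp : 10 ^ ndig (s + 1) ≤ 10 ^ ndig (s + 2) := Nat.pow_le_pow_right (by norm_num) hm
  have h10 := ten_le_pow_ndig (s + 1)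
  simp only [chain]
  have e1 : s + 1 + 0 + 1 = s + 2 := by omega
  have e2 : s + 0 + 1 = s + 1 := by omega
  rw [e1, e2]
  nlinarith

theorem chain1_mono_le (s s' : Nat) (hs : 1 ≤ s) (h : s ≤ s') : chain s 1 ≤ chain s' 1 := by
  obtain ⟨d, rfl⟩ : ∃ d, s' = s + d := ⟨s' - s, by omega⟩
  clear h
  induction d with
  | zero => simp
  | succ d ih =>
    have := chain1_mono (s + d) (by omega)
    have e : s + d + 1 = s + (d + 1) := by omega
    rw [e] at this
    omega

theorem toDigits_chain (s : Nat) (hs : 1 ≤ s) (j : Nat) :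
    Nat.toDigits 10 (chain s (j+1)) = Nat.toDigits 10 (chain s j) ++ Nat.toDigits 10 (s + j + 1) := by
  simpa only [chain] using toDigits_append (s + j + 1) (chain s j) (chain_pos s hs j)

theorem toDigits_chain_prefix (s : Nat) (hs : 1 ≤ s) (j : Nat) :
    ∃ rest : List Char, rest ≠ [] ∧ Nat.toDigits 10 (chain s (j+1)) = Nat.toDigits 10 s ++ rest := by
  induction j with
  | zero =>
    refine ⟨Nat.toDigits 10 (s + 1), toDigits_ne_nil _, ?_⟩
    have := toDigits_chain s hs 0
    simpa [chain] using this
  | succ j ih =>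
    obtain ⟨rest, hne, heq⟩ := ih
    refine ⟨rest ++ Nat.toDigits 10 (s + (j + 1) + 1), by simp [hne], ?_⟩
    rw [toDigits_chain s hs (j + 1), heq, List.append_assoc]

-- ---- A-side loop characterizations ----
theorem parse_toDigits (m : Nat) : PySem.Int.ofChars? (Nat.toDigits 10 m) = some ((m : Nat) : Int) := by
  rw [parse_digits _ (toDigits_ne_nil m) (toDigits_all_digit m), valD_toDigits]

theorem toChars_natCast (m : Nat) : PySem.Int.toChars ((m : Nat) : Int) = Nat.toDigits 10 m := by
  rw [toChars_nonneg _ (by positivity)]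
  simp

theorem isRoaringInner_spec (num : Int) (hnum : 1 ≤ num) (s : Nat) (hs : 1 ≤ s) :
    ∀ (fuel : Nat) (j : Nat), num.toNat + 1 < fuel + chain s j →
      (isRoaringInner num (s + j : Nat) (Nat.toDigits 10 (chain s j)) fuel = true ↔
        ∃ j', j ≤ j' ∧ chain s j' = num.toNat) := by
  intro fuel
  induction fuel with
  | zero =>
    intro j hcond
    simp only [isRoaringInner]
    constructor
    · intro h; exact absurd h (by simp)
    · rintro ⟨j', hj', hchain⟩
      exfalso
      have : chain s j ≤ chain s j' := by
        rcases Nat.eq_or_lt_of_le hj' with rfl | hlt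
        · exact le_refl _
        · exact le_of_lt (chain_mono s hs hlt)
      omega
  | succ f ih =>
    intro j hcond
    simp only [isRoaringInner, parse_toDigits, Option.getD_some]
    by_cases hle : ((chain s j : Nat) : Int) ≤ num
    · rw [if_pos hle]
      by_cases heq : ((chain s j : Nat) : Int) = num
      · rw [if_pos heq]
        have : chain s j = num.toNat := by omega
        simp only [true_iff]
        exact ⟨j, le_refl j, this⟩
      · rw [if_neg heq]
        have hne : chain s j ≠ num.toNat := by
          intro hcc
          apply heq
          omega
        have hcast : ((s + j : Nat) : Int) + 1 = (((s + (j + 1)) : Nat) : Int) := by push_cast; ring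
        have hchars : PySem.Int.toChars (((s + j : Nat) : Int) + 1) = Nat.toDigits 10 (s + (j + 1)) := by
          rw [hcast, toChars_natCast]
        rw [hchars, hcast]
        have hjoin : Nat.toDigits 10 (chain s j) ++ Nat.toDigits 10 (s + (j + 1)) = Nat.toDigits 10 (chain s (j + 1)) := by
          exact (toDigits_chain s hs j).symm
        rw [hjoin]
        have hstep := chain_step_lt s hs j
        have hrec := ih (j + 1) (by omega)
        rw [hrec]
        constructor
        · rintro ⟨j', hj', hc⟩; exact ⟨j', by omega, hc⟩
        · rintro ⟨j', hj', hc⟩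
          refine ⟨j', ?_, hc⟩
          rcases Nat.eq_or_lt_of_le hj' with rfl | hlt
          · exact absurd hc hne
          · omega
    · rw [if_neg hle]
      constructor
      · intro h; exact absurd h (by simp)
      · rintro ⟨j', hj', hchain⟩
        exfalso
        have h1 : chain s j ≤ chain s j' := by
          rcases Nat.eq_or_lt_of_le hj' with rfl | hlt
          · exact le_refl _
          · exact le_of_lt (chain_mono s hs hlt)
        omega

theorem isRoaring_spec (num : Int) (hnum : 1 ≤ num) :
    isRoaring num = true ↔ IsRoar num.toNat := by
  have hm : 1 ≤ num.toNat := by omega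
  set m := num.toNat with hmdef
  have hnum' : num = (m : Int) := by omega
  unfold isRoaring
  rw [hnum', toChars_natCast]
  simp only [List.any_eq_true]
  have hlen : (Nat.toDigits 10 m).length = ndig m := rfl
  constructor
  · rintro ⟨i, hmem, hpred⟩
    rw [PySem.List.mem_pyRange_one] at hmem
    rw [hlen] at hmem
    obtain ⟨hi1, hi2⟩ := hmem
    have hint : 0 ≤ i := by omega
    rw [PySem.List.slice_to _ hint] at hpred
    set i' := i.toNat with hi'
    have hi'1 : 1 ≤ i' := by omega
    have hi'2 : i' < ndig m := by omega
    have htake : valD ((Nat.toDigits 10 m).take i') = m / 10 ^ (ndig m - i') :=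
      valD_take m hm i' hi'1 (by omega)
    have hne : (Nat.toDigits 10 m).take i' ≠ [] := by
      have : ((Nat.toDigits 10 m).take i').length = i' := by
        rw [List.length_take, hlen]
        omega
      intro hc
      rw [hc] at this
      simp at this
      omega
    have hdig : AllDigit ((Nat.toDigits 10 m).take i') := fun c hc =>
      toDigits_all_digit m c (List.mem_of_mem_take hc)
    rw [parse_digits _ hne hdig, htake] at hpred
    simp only [Option.getD_some] at hpred
    set P := m / 10 ^ (ndig m - i') with hP
    have hPpos : 1 ≤ P := by
      have hb := (ndig_bounds m hm).1
      have hple : 10 ^ (ndig m - i') ≤ 10 ^ (ndig m - 1) :=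
        Nat.pow_le_pow_right (by norm_num) (by omega)
      have h10 : 0 < 10 ^ (ndig m - i') := by positivity
      rw [hP]
      rw [Nat.le_div_iff_mul_le h10]
      omega
    rw [toChars_natCast] at hpred
    have hinner := isRoaringInner_spec (m : Int) (by omega) P hPpos (m + 2) 0 (by simp; omega)
    have e0 : P + 0 = P := by omega
    rw [e0] at hinner
    have : chain P 0 = P := rfl
    rw [this] at hinner
    have hcast2 : ((m : Int)).toNat = m := by omega
    rw [hcast2] at hinner
    rw [hcast2] at hpred
    rw [hinner] at hpred
    obtain ⟨j', _, hc⟩ := hpred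
    have hj' : 1 ≤ j' := by
      rcases Nat.eq_zero_or_pos j' with rfl | h
      · exfalso
        have : chain P 0 = P := rfl
        rw [this] at hc
        have hple : 10 ^ (ndig m - i') ≥ 10 := by
          calc (10:Nat) = 10 ^ 1 := (pow_one 10).symm
          _ ≤ 10 ^ (ndig m - i') := Nat.pow_le_pow_right (by norm_num) (by omega)
        have : P ≤ m / 10 := by
          rw [hP]
          exact Nat.div_le_div_left hple (by norm_num)
        have : m / 10 < m := Nat.div_lt_self (by omega) (by norm_num)
        omega
      · exact h
    exact ⟨P, hPpos, j', hj', hc⟩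
  · rintro ⟨σ, hσ, j, hj, hc⟩
    refine ⟨(ndig σ : Int), ?_, ?_⟩
    · rw [PySem.List.mem_pyRange_one, hlen]
      obtain ⟨rest, hrne, hreq⟩ := toDigits_chain_prefix σ hσ (j - 1)
      have hj1 : j - 1 + 1 = j := by omega
      rw [hj1, hc] at hreq
      have : ndig m = ndig σ + rest.length := by
        unfold ndig
        rw [hreq]
        simp
      have hrl : 1 ≤ rest.length := by
        cases rest with
        | nil => exact absurd rfl hrne
        | cons a t => simp
      have := ndig_pos σ
      constructor
      · omega
      · omega
    · have hint : (0:Int) ≤ (ndig σ : Int) := by positivity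
      rw [PySem.List.slice_to _ hint]
      have htn : ((ndig σ : Int)).toNat = ndig σ := by omega
      rw [htn]
      obtain ⟨rest, hrne, hreq⟩ := toDigits_chain_prefix σ hσ (j - 1)
      have hj1 : j - 1 + 1 = j := by omega
      rw [hj1, hc] at hreq
      have htake : (Nat.toDigits 10 m).take (ndig σ) = Nat.toDigits 10 σ := by
        rw [hreq]
        have : ndig σ = (Nat.toDigits 10 σ).length := rfl
        rw [this, List.take_left]
      rw [htake, parse_toDigits]
      simp only [Option.getD_some]
      rw [toChars_natCast]
      have hinner := isRoaringInner_spec (m : Int) (by omega) σ hσ (m + 2) 0 (by simp; omega)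
      have e0 : σ + 0 = σ := by omega
      rw [e0] at hinner
      have hch0 : chain σ 0 = σ := rfl
      rw [hch0] at hinner
      have hcast2 : ((m : Int)).toNat = m := by omega
      rw [hcast2] at hinner
      rw [hcast2]
      rw [hinner]
      exact ⟨j, by omega, hc⟩

theorem isRoaring_zero : isRoaring 0 = false := by
  decide

theorem scanRoar_spec (m : Int) (hm : isRoaring m = true)
    (g : Int) (hg : g ≤ m) (hall : ∀ x : Int, g ≤ x → x < m → isRoaring x = false) :
    ∀ fuel : Nat, m < g + fuel → scanRoar g fuel = some m := by
  intro fuel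
  induction fuel generalizing g with
  | zero =>
    intro h
    exfalso
    omega
  | succ f ih =>
    intro h
    by_cases hgm : g = m
    · subst hgm
      simp [scanRoar, hm]
    · have hglt : g < m := by omega
      have hfalse : isRoaring g = false := hall g (le_refl g) hglt
      simp only [scanRoar, hfalse]
      rw [if_neg (by simp)]
      exact ih (g + 1) (by omega) (fun x hx1 hx2 => hall x (by omega) hx2) (by omega)

-- ---- B-side loop characterizations ----
theorem digitsBLoop_spec (n : Int) (hn : 1 ≤ n) :
    ∀ (fuel d : Nat), 1 ≤ d → 10 ^ (d - 1) ≤ n.toNat → ndig n.toNat + 1 ≤ fuel + d →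
      digitsBLoop n fuel (d : Int) = (ndig n.toNat : Int) := by
  intro fuel
  induction fuel with
  | zero =>
    intro d hd hlow hcond
    exfalso
    have hb := (ndig_bounds n.toNat (by omega)).2
    have : 10 ^ ndig n.toNat ≤ 10 ^ (d - 1) := Nat.pow_le_pow_right (by norm_num) (by omega)
    omega
  | succ f ih =>
    intro d hd hlow hcond
    simp only [digitsBLoop]
    have htn : ((d : Int)).toNat = d := by omega
    rw [htn]
    by_cases hcase : (10:Int) ^ d ≤ n
    · rw [if_pos hcase]
      have hnat : 10 ^ d ≤ n.toNat := by
        have : ((10:Int) ^ d) = ((10 ^ d : Nat) : Int) := by push_cast; ring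
        omega
      have : ((d : Int)) + 1 = ((d + 1 : Nat) : Int) := by push_cast; ring
      rw [this]
      exact ih (d + 1) (by omega) (by simpa using hnat) (by omega)
    · rw [if_neg hcase]
      have hup : n.toNat < 10 ^ d := by
        have : ((10:Int) ^ d) = ((10 ^ d : Nat) : Int) := by push_cast; ring
        omega
      have hb1 := (ndig_bounds n.toNat (by omega)).1
      have hb2 := (ndig_bounds n.toNat (by omega)).2
      have hdeq : d = ndig n.toNat := by
        by_contra hne
        rcases Nat.lt_or_ge d (ndig n.toNat) with hlt | hge
        · have : 10 ^ d ≤ 10 ^ (ndig n.toNat - 1) := Nat.pow_le_pow_right (by norm_num) (by omega)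
          omega
        · have hgt : ndig n.toNat < d := by omega
          have : 10 ^ ndig n.toNat ≤ 10 ^ (d - 1) := Nat.pow_le_pow_right (by norm_num) (by omega)
          omega
      rw [hdeq]

theorem digitsB_spec (n : Int) (h : 1 ≤ n) : digitsB n = (ndig n.toNat : Int) := by
  unfold digitsB
  have h1 : (1 : Int) = ((1 : Nat) : Int) := by norm_num
  rw [h1]
  refine digitsBLoop_spec n h (n.toNat + 1) 1 (by omega) ?_ ?_
  · have h2 : 1 ≤ n.toNat := by omega
    simpa using h2
  · have hb := (ndig_bounds n.toNat (by omega)).1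
    have hlt : ndig n.toNat - 1 < 10 ^ (ndig n.toNat - 1) := Nat.lt_pow_self (by norm_num)
    omega

theorem chainUpLoop_spec (Y : Int) (s : Nat) (hs : 1 ≤ s) :
    ∀ (fuel j : Nat), 1 ≤ fuel → Y.toNat + 1 < fuel + chain s j →
      ∃ j'', j < j'' ∧ chainUpLoop Y ((chain s j : Nat) : Int) ((s + j + 1 : Nat) : Int) fuel = ((chain s j'' : Nat) : Int) ∧
        Y < ((chain s j'' : Nat) : Int) ∧ ∀ t, j < t → t < j'' → ((chain s t : Nat) : Int) ≤ Y := by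
  intro fuel
  induction fuel with
  | zero => intro j h0; exact absurd h0 (by omega)
  | succ f ih =>
    intro j _ hcond
    simp only [chainUpLoop]
    have hdig : digitsB ((s + j + 1 : Nat) : Int) = (ndig (s + j + 1) : Int) := by
      rw [digitsB_spec _ (by exact_mod_cast Nat.one_le_iff_ne_zero.mpr (by omega))]
      congr 1
    rw [hdig]
    have htn : ((ndig (s + j + 1) : Nat) : Int).toNat = ndig (s + j + 1) := by omega
    rw [htn]
    have hv' : ((chain s j : Nat) : Int) * (10:Int) ^ ndig (s + j + 1) + ((s + j + 1 : Nat) : Int)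
        = ((chain s (j + 1) : Nat) : Int) := by
      show _ = ((chain s j * 10 ^ ndig (s + j + 1) + (s + j + 1) : Nat) : Int)
      push_cast
      ring
    rw [hv']
    by_cases hgt : Y < ((chain s (j + 1) : Nat) : Int)
    · rw [if_pos hgt]
      exact ⟨j + 1, by omega, rfl, hgt, fun t h1 h2 => by omega⟩
    · rw [if_neg hgt]
      rw [not_lt] at hgt
      have hle : chain s (j + 1) ≤ Y.toNat := by omega
      have hstep := chain_step_lt s hs j
      have hf : 1 ≤ f := by omega
      have hcast : ((s + j + 1 : Nat) : Int) + 1 = ((s + (j + 1) + 1 : Nat) : Int) := by push_cast; ring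
      rw [hcast]
      obtain ⟨j'', hj1, heq, hgt2, hall⟩ := ih (j + 1) hf (by omega)
      refine ⟨j'', by omega, heq, hgt2, ?_⟩
      intro t h1 h2
      rcases Nat.eq_or_lt_of_le (Nat.succ_le_of_lt h1) with rfl | hlt
      · omega
      · exact hall t (by omega) h2

theorem chainUpB_spec (s : Nat) (hs : 1 ≤ s) (Y : Int) :
    (Y < chainUpB (s : Int) Y) ∧ (∃ j, 1 ≤ j ∧ chainUpB (s : Int) Y = (chain s j : Int)) ∧
      (∀ j, 1 ≤ j → Y < (chain s j : Int) → chainUpB (s : Int) Y ≤ (chain s j : Int)) := by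
  unfold chainUpB
  have hch0 : ((s : Nat) : Int) = ((chain s 0 : Nat) : Int) := rfl
  have hnx : ((s : Nat) : Int) + 1 = ((s + 0 + 1 : Nat) : Int) := by push_cast; ring
  rw [hnx, hch0]
  obtain ⟨j'', hj0, heq, hgt, hall⟩ := chainUpLoop_spec Y s hs (Y.toNat + 2) 0 (by omega) (by omega)
  rw [heq]
  refine ⟨hgt, ⟨j'', by omega, rfl⟩, ?_⟩
  intro j' hj' hYj'
  rcases Nat.lt_or_ge j' j'' with hlt | hge
  · exact absurd hYj' (by have := hall j' (by omega) hlt; omega)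
  · rcases Nat.eq_or_lt_of_le hge with rfl | hlt2
    · exact le_refl _
    · exact le_of_lt (by exact_mod_cast chain_mono s hs hlt2)

theorem extendALoop_spec (Y : Int) (s : Nat) (hs : 1 ≤ s) :
    ∀ (fuel j : Nat), 1 ≤ fuel → Y.toNat + 1 < fuel + chain s j →
      ∃ j'', j ≤ j'' ∧ extendA Y (Nat.toDigits 10 (chain s j)) ((s + j + 1 : Nat) : Int) fuel = ((chain s j'' : Nat) : Int) ∧
        Y < ((chain s j'' : Nat) : Int) ∧ ∀ t, j ≤ t → t < j'' → ((chain s t : Nat) : Int) ≤ Y := by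
  intro fuel
  induction fuel with
  | zero => intro j h0; exact absurd h0 (by omega)
  | succ f ih =>
    intro j _ hcond
    simp only [extendA, parse_toDigits, Option.getD_some]
    by_cases hle : ((chain s j : Nat) : Int) ≤ Y
    · rw [if_pos hle]
      have hstep := chain_step_lt s hs j
      have hf : 1 ≤ f := by omega
      have hchars : PySem.Int.toChars ((s + j + 1 : Nat) : Int) = Nat.toDigits 10 (s + j + 1) := toChars_natCast _
      rw [hchars]
      have hjoin : Nat.toDigits 10 (chain s j) ++ Nat.toDigits 10 (s + j + 1) = Nat.toDigits 10 (chain s (j + 1)) :=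
        (toDigits_chain s hs j).symm
      rw [hjoin]
      have hcast : ((s + j + 1 : Nat) : Int) + 1 = ((s + (j + 1) + 1 : Nat) : Int) := by push_cast; ring
      rw [hcast]
      obtain ⟨j'', hj1, heq, hgt2, hall⟩ := ih (j + 1) hf (by omega)
      refine ⟨j'', by omega, heq, hgt2, ?_⟩
      intro t h1 h2
      rcases Nat.eq_or_lt_of_le h1 with rfl | hlt
      · exact hle
      · exact hall t (by omega) h2
    · rw [if_neg hle]
      exact ⟨j, le_refl j, rfl, by omega, fun t h1 h2 => by omega⟩

theorem extendA_spec (s : Nat) (hs : 1 ≤ s) (Y : Int) (hsY : (s : Int) ≤ Y) :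
    extendA Y (Nat.toDigits 10 s) ((s : Int) + 1) (Y.toNat + 2) = chainUpB (s : Int) Y := by
  have hch0 : Nat.toDigits 10 s = Nat.toDigits 10 (chain s 0) := rfl
  have hadd : (s : Int) + 1 = ((s + 0 + 1 : Nat) : Int) := by push_cast; ring
  rw [hch0, hadd]
  obtain ⟨jA, hjA0, heqA, hgtA, hallA⟩ := extendALoop_spec Y s hs (Y.toNat + 2) 0 (by omega) (by omega)
  rw [heqA]
  obtain ⟨hgtB, ⟨jB, hjB1, heqB⟩, hminB⟩ := chainUpB_spec s hs Y
  rw [heqB]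
  have hjA1 : 1 ≤ jA := by
    rcases Nat.eq_zero_or_pos jA with rfl | h
    · exfalso
      have : ((chain s 0 : Nat) : Int) = (s : Int) := rfl
      rw [this] at hgtA
      omega
    · exact h
  have h1 : ((chain s jA : Nat) : Int) ≤ ((chain s jB : Nat) : Int) := by
    rcases Nat.lt_or_ge jA jB with hlt | hge
    · exact le_of_lt (by exact_mod_cast chain_mono s hs hlt)
    · rcases Nat.eq_or_lt_of_le hge with rfl | hlt2
      · exact le_refl _
      · exfalso
        have := hallA jB (by omega) hlt2
        rw [heqB] at hgtB
        omega
  have h2 : ((chain s jB : Nat) : Int) ≤ ((chain s jA : Nat) : Int) := by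
    rw [← heqB]
    exact hminB jA hjA1 hgtA
  omega

-- ---- assembly ----
theorem prefix_parse (m : Nat) (hm : 1 ≤ m) (i : Int) (h1 : 1 ≤ i) (h2 : i < (ndig m : Int)) :
    (PySem.Int.ofChars? (PySem.List.slice (Nat.toDigits 10 m) none (some i))).getD 0
      = ((m / 10 ^ (ndig m - i.toNat) : Nat) : Int) := by
  have hint : (0:Int) ≤ i := by omega
  rw [PySem.List.slice_to _ hint]
  set i' := i.toNat with hi'
  have hi'1 : 1 ≤ i' := by omega
  have hi'2 : i' < ndig m := by omega
  have hlen : (Nat.toDigits 10 m).length = ndig m := rfl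
  have hne : (Nat.toDigits 10 m).take i' ≠ [] := by
    have hl : ((Nat.toDigits 10 m).take i').length = i' := by
      rw [List.length_take, hlen]
      omega
    intro hc
    rw [hc] at hl
    simp at hl
    omega
  have hdig : AllDigit ((Nat.toDigits 10 m).take i') := fun c hc =>
    toDigits_all_digit m c (List.mem_of_mem_take hc)
  rw [parse_digits _ hne hdig, valD_take m hm i' hi'1 (by omega)]
  rfl

theorem div_pow_pos (m : Nat) (hm : 1 ≤ m) (k : Nat) (hk : k + 1 ≤ ndig m) : 1 ≤ m / 10 ^ k := by
  have hb := (ndig_bounds m hm).1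
  have hple : 10 ^ k ≤ 10 ^ (ndig m - 1) := Nat.pow_le_pow_right (by norm_num) (by omega)
  have h10 : 0 < 10 ^ k := by positivity
  rw [Nat.le_div_iff_mul_le h10]
  omega

theorem div_pow_lt (m : Nat) (k : Nat) (hk : 1 ≤ k) : m / 10 ^ k ≤ m / 10 := by
  exact Nat.div_le_div_left (by calc (10:Nat) = 10 ^ 1 := (pow_one 10).symm
    _ ≤ 10 ^ k := Nat.pow_le_pow_right (by norm_num) hk) (by norm_num)

theorem chain1_ge (s : Nat) : 10 * s + 1 ≤ chain s 1 := by
  have := ten_le_pow_ndig (s + 0 + 1)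
  simp only [chain]
  nlinarith

theorem chain1_ub (s e : Nat) (h : s + 1 < 10 ^ e) : chain s 1 ≤ s * 10 ^ e + (s + 1) := by
  have hnd : ndig (s + 1) ≤ e := by
    by_contra hc
    have hb := (ndig_bounds (s + 1) (by omega)).1
    have : 10 ^ e ≤ 10 ^ (ndig (s + 1) - 1) := Nat.pow_le_pow_right (by norm_num) (by omega)
    omega
  have hp : 10 ^ ndig (s + 1) ≤ 10 ^ e := Nat.pow_le_pow_right (by norm_num) hnd
  simp only [chain]
  have e1 : s + 0 + 1 = s + 1 := by omega
  rw [e1]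
  nlinarith

theorem region_small (Y : Int) (h1 : -1 ≤ Y) (h2 : Y ≤ 10 ^ 6) :
    easy_solution Y = easy_solution_alt Y := by
  -- B side: the minimum exists and is a chain value
  have hvB : easy_solution_alt Y
      = (PySem.List.min? ((PySem.List.pyRange 1 (max (Y + 2) 2) 1).map (fun s => chainUpB s Y)) (fun x => x)).getD 0 := by
    unfold easy_solution_alt
    rw [if_pos h2]
  have h1mem : (1:Int) ∈ PySem.List.pyRange 1 (max (Y + 2) 2) 1 := by
    rw [PySem.List.mem_pyRange_one]
    have := le_max_right (Y + 2) (2:Int)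
    omega
  set L := (PySem.List.pyRange 1 (max (Y + 2) 2) 1).map (fun s => chainUpB s Y) with hLdef
  have hLne : L ≠ [] := by
    have hmem : chainUpB 1 Y ∈ L := List.mem_map_of_mem h1mem
    intro hc
    rw [hc] at hmem
    simp at hmem
  obtain ⟨v, hv⟩ : ∃ v, PySem.List.min? L (fun x => x) = some v := by
    cases hmin : PySem.List.min? L (fun x => x) with
    | none => exact absurd ((PySem.List.min?_eq_none_iff L _).mp hmin) hLne
    | some v => exact ⟨v, rfl⟩
  have hvmem := PySem.List.min?_mem hv
  have hvmin := PySem.List.min?_isMin hv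
  obtain ⟨si, hsimem, hsieq⟩ := List.mem_map.mp hvmem
  rw [PySem.List.mem_pyRange_one] at hsimem
  have hsi1 : 1 ≤ si := hsimem.1
  set σ := si.toNat with hσ
  have hsiσ : si = ((σ : Nat) : Int) := by omega
  rw [hsiσ] at hsieq
  obtain ⟨hgtσ, ⟨j, hj1, hchσ⟩, hminσ⟩ := chainUpB_spec σ (by omega) Y
  have hvchain : v = ((chain σ j : Nat) : Int) := by rw [← hsieq, hchσ]
  have hvgt : Y < v := by rw [← hsieq]; exact hgtσ
  -- global minimality of v among all chain values exceeding Y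
  have Hmin : ∀ (s' : Nat), 1 ≤ s' → ∀ j', 1 ≤ j' → Y < ((chain s' j' : Nat) : Int) → v ≤ ((chain s' j' : Nat) : Int) := by
    intro s' hs' j' hj' hYc
    obtain ⟨hgt', ⟨jx, hjx1, hchx⟩, hminx⟩ := chainUpB_spec s' hs' Y
    by_cases hcase : ((s' : Nat) : Int) < max (Y + 2) 2
    · have hmem' : ((s' : Nat) : Int) ∈ PySem.List.pyRange 1 (max (Y + 2) 2) 1 := by
        rw [PySem.List.mem_pyRange_one]
        constructor
        · exact_mod_cast hs'
        · exact hcase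
      have hin : chainUpB ((s' : Nat) : Int) Y ∈ L := List.mem_map_of_mem hmem'
      have := hvmin _ hin
      calc v ≤ chainUpB ((s' : Nat) : Int) Y := this
      _ ≤ ((chain s' j' : Nat) : Int) := hminx j' hj' hYc
    · -- s' is beyond the enumeration bound; compare through σ₀ := max (Y+1) 1
      set σ₀ := (max (Y + 1) 1).toNat with hσ₀
      have hσ₀cast : ((σ₀ : Nat) : Int) = max (Y + 1) 1 := by omega
      have hσ₀1 : 1 ≤ σ₀ := by omega
      have hmem₀ : ((σ₀ : Nat) : Int) ∈ PySem.List.pyRange 1 (max (Y + 2) 2) 1 := by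
        rw [PySem.List.mem_pyRange_one, hσ₀cast]
        omega
      have hin₀ : chainUpB ((σ₀ : Nat) : Int) Y ∈ L := List.mem_map_of_mem hmem₀
      obtain ⟨hgt₀, ⟨j₀, hj₀1, hch₀⟩, hmin₀⟩ := chainUpB_spec σ₀ hσ₀1 Y
      have hY1 : Y < ((chain σ₀ 1 : Nat) : Int) := by
        have := chain1_ge σ₀
        have hc : (10 * σ₀ + 1 : Nat) ≤ chain σ₀ 1 := this
        have : ((10 * σ₀ + 1 : Nat) : Int) ≤ ((chain σ₀ 1 : Nat) : Int) := by exact_mod_cast hc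
        omega
      have hs'ge : σ₀ ≤ s' := by
        rw [not_lt] at hcase
        omega
      have hchain1le : chain σ₀ 1 ≤ chain s' 1 := chain1_mono_le σ₀ s' hσ₀1 hs'ge
      have hchainj : chain s' 1 ≤ chain s' j' := by
        rcases Nat.eq_or_lt_of_le hj' with h | h
        · rw [← h]
        · exact le_of_lt (chain_mono s' hs' h)
      calc v ≤ chainUpB ((σ₀ : Nat) : Int) Y := hvmin _ hin₀
      _ ≤ ((chain σ₀ 1 : Nat) : Int) := hmin₀ 1 (le_refl 1) hY1
      _ ≤ ((chain s' j' : Nat) : Int) := by exact_mod_cast le_trans hchain1le hchainj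
  -- upper bound on v
  have hub : v ≤ 100000000000000 := by
    set σ₀ := (max (Y + 1) 1).toNat with hσ₀
    have hσ₀cast : ((σ₀ : Nat) : Int) = max (Y + 1) 1 := by omega
    have hσ₀1 : 1 ≤ σ₀ := by omega
    have hσ₀ub : σ₀ ≤ 10 ^ 6 + 1 := by omega
    have hmem₀ : ((σ₀ : Nat) : Int) ∈ PySem.List.pyRange 1 (max (Y + 2) 2) 1 := by
      rw [PySem.List.mem_pyRange_one, hσ₀cast]
      omega
    have hin₀ : chainUpB ((σ₀ : Nat) : Int) Y ∈ L := List.mem_map_of_mem hmem₀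
    obtain ⟨hgt₀, ⟨j₀, hj₀1, hch₀⟩, hmin₀⟩ := chainUpB_spec σ₀ hσ₀1 Y
    have hY1 : Y < ((chain σ₀ 1 : Nat) : Int) := by
      have hc : (10 * σ₀ + 1 : Nat) ≤ chain σ₀ 1 := chain1_ge σ₀
      have : ((10 * σ₀ + 1 : Nat) : Int) ≤ ((chain σ₀ 1 : Nat) : Int) := by exact_mod_cast hc
      omega
    have hcub : chain σ₀ 1 ≤ σ₀ * 10 ^ 7 + (σ₀ + 1) := chain1_ub σ₀ 7 (by norm_num; omega)
    have hcub2 : chain σ₀ 1 ≤ 100000000000000 := by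
      have h7 : (10:Nat) ^ 7 = 10000000 := by norm_num
      have h6 : (10:Nat) ^ 6 = 1000000 := by norm_num
      rw [h7] at hcub
      rw [h6] at hσ₀ub
      omega
    calc v ≤ chainUpB ((σ₀ : Nat) : Int) Y := hvmin _ hin₀
    _ ≤ ((chain σ₀ 1 : Nat) : Int) := hmin₀ 1 (le_refl 1) hY1
    _ ≤ 100000000000000 := by exact_mod_cast hcub2
  -- v is roaring
  have hv1 : (1:Int) ≤ v := by
    rw [hvchain]
    have := chain_pos σ (by omega) j
    exact_mod_cast this
  have hroar : isRoaring v = true := by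
    rw [isRoaring_spec v hv1]
    exact ⟨σ, by omega, j, hj1, by omega⟩
  -- nothing strictly between Y and v is roaring
  have hall : ∀ x : Int, Y + 1 ≤ x → x < v → isRoaring x = false := by
    intro x hx1 hx2
    rcases (show (0:Int) ≤ x from by omega).lt_or_eq with hpos | h0
    case inr =>
      rw [← h0]
      exact isRoaring_zero
    · by_contra hc
      rw [Bool.not_eq_false] at hc
      rw [isRoaring_spec x (by omega)] at hc
      obtain ⟨s', hs', j', hj', hcx⟩ := hc
      have hxc : x = ((chain s' j' : Nat) : Int) := by omega
      have := Hmin s' hs' j' hj' (by omega)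
      omega
  -- A side: the scan stops exactly at v
  have hscan : scanRoar (Y + 1) (100000000100000001 - (Y + 1)).toNat = some v := by
    apply scanRoar_spec v hroar (Y + 1) (by omega) (fun x hx1 hx2 => hall x hx1 hx2)
    have hF : (((100000000100000001 - (Y + 1)).toNat : Nat) : Int) = 100000000100000001 - (Y + 1) := by omega
    omega
  unfold easy_solution
  rw [if_pos h2]
  simp only [hscan]
  rw [hvB, hv]
  rfl

theorem region_large (Y : Int) (h2 : 10 ^ 6 < Y) (hdom : Y ≤ 2147483648) :
    easy_solution Y = easy_solution_alt Y := by
  have hm1 : (1:Int) ≤ Y := by omega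
  set m := Y.toNat with hmdef
  have hY : Y = (m : Int) := by omega
  have hmge : 10 ^ 6 + 1 ≤ m := by omega
  unfold easy_solution easy_solution_alt
  rw [if_neg (by omega : ¬ Y ≤ 10 ^ 6)]
  simp only []
  rw [if_neg (by omega : ¬ Y < 12)]
  rw [if_neg (by omega : ¬ Y ≤ 10 ^ 6)]
  rw [digitsB_spec Y hm1]
  rw [hY]
  simp only [Int.toNat_natCast]
  rw [toChars_natCast]
  have hlen : ((Nat.toDigits 10 m).length : Int) = ((ndig m : Nat) : Int) := rfl
  rw [hlen]
  apply PySem.List.foldl_congr_mem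
  intro acc i hi
  rw [PySem.List.mem_pyRange_one] at hi
  obtain ⟨hi1, hi2⟩ := hi
  have hi2' : i.toNat < ndig m := by omega
  have hi1' : 1 ≤ i.toNat := by omega
  set k := ndig m - i.toNat with hk
  have hkcast : ((ndig m : Nat) : Int) - i = ((k : Nat) : Int) := by omega
  have hk1 : 1 ≤ k := by omega
  have hkle : k + 1 ≤ ndig m := by omega
  set P := m / 10 ^ k with hP
  have hP1 : 1 ≤ P := div_pow_pos m (by omega) k hkle
  have hPle : P ≤ m / 10 := div_pow_lt m k hk1
  have hPltm : P < m := by omega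
  have hP1m : P + 1 ≤ m := by omega
  -- the parsed prefix is P
  have hpar : (PySem.Int.ofChars? (PySem.List.slice (Nat.toDigits 10 m) none (some i))).getD 0 = ((P : Nat) : Int) := by
    rw [prefix_parse m (by omega) i hi1 (by exact_mod_cast hi2)]
  -- the arithmetic prefix is P
  have hfl : PySem.Int.floordiv ((m : Nat) : Int) ((10:Int) ^ (((ndig m : Nat) : Int) - i).toNat) = ((P : Nat) : Int) := by
    rw [hkcast]
    simp only [Int.toNat_natCast]
    rw [PySem.Int.floordiv_eq_ediv_of_pos (by positivity)]
    rw [show ((10:Int) ^ k) = ((10 ^ k : Nat) : Int) from by push_cast; ring]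
    rw [hP]
    exact_mod_cast (Int.natCast_ediv m (10 ^ k)).symm
  rw [hpar, hfl]
  -- candidates
  have hc1 : extendA ((m : Nat) : Int) (PySem.Int.toChars ((P : Nat) : Int)) (((P : Nat) : Int) + 1) (m + 2)
      = chainUpB ((P : Nat) : Int) ((m : Nat) : Int) := by
    have := extendA_spec P hP1 ((m : Nat) : Int) (by exact_mod_cast Nat.le_of_lt hPltm)
    simp only [Int.toNat_natCast] at this
    rw [toChars_natCast]
    exact this
  have hc2 : extendA ((m : Nat) : Int) (PySem.Int.toChars (((P : Nat) : Int) + 1)) (((P : Nat) : Int) + 2) (m + 2)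
      = chainUpB (((P : Nat) : Int) + 1) ((m : Nat) : Int) := by
    have hcast : ((P : Nat) : Int) + 1 = (((P + 1 : Nat)) : Int) := by push_cast; ring
    rw [hcast, toChars_natCast]
    have := extendA_spec (P + 1) (by omega) ((m : Nat) : Int) (by exact_mod_cast hP1m)
    simp only [Int.toNat_natCast] at this
    rw [show (((P + 1 : Nat)) : Int) + 1 = ((P : Nat) : Int) + 2 from by push_cast; ring] at this
    exact this
  rw [hc1, hc2]

-- ===== VERDICT (by name: the statement is the Claim_ definition above) =====
theorem easy_solution_spec : Claim_equal_easy_solution := by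
  intro Y hdom hpre
  unfold Spec_easy_solution
  by_cases h : Y ≤ 10 ^ 6
  · exact region_small Y hpre h
  · have hdom' : Y ≤ 2147483648 := by
      unfold Dom_easy_solution pvDomInt at hdom
      simpa using of_decide_eq_true hdom |>.2
    exact region_large Y (by omega) hdom'
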